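-- pv_equiv track=rewrite | github.com/AlecBytes/AdventOfCode2025 | day6/solution.py | convert_chunk_to_nums
-- ===== SOURCE A (Python) =====
-- def convert_chunk_to_nums(chunk):
--     nums = []
--     width = len(chunk[0])
--     for i in range(width):
--         num_str = ''
--         for sub_chunk in chunk:
--             num_str += sub_chunk[(i + 1) * -1]
--         nums.append(int(num_str))
--     return nums
-- ===== SOURCE B (Python) =====
-- def convert_chunk_to_nums(chunk):
--     # Flatten the chunk into one buffer of right-aligned width-w rows, then read
--     # each column as a strided slice of the buffer: s[w-1-j::w] is column j
--     # (rightmost column first), top to bottom.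
--     w = len(chunk[0])
--     s = ''.join(row[len(row) - w:] for row in chunk)
--     return [int(s[w - 1 - j::w]) for j in range(w)]
-- ===== Notes on version B (the rewrite author's own statement) =====
-- stated objective: alternative
-- what changed: Instead of A's nested loops that index each row at -(i+1) and grow a string per column, B flattens the right-aligned rows into one character buffer and reads each column as a single strided slice s[w-1-j::w] of that buffer.
import Mathlib
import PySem

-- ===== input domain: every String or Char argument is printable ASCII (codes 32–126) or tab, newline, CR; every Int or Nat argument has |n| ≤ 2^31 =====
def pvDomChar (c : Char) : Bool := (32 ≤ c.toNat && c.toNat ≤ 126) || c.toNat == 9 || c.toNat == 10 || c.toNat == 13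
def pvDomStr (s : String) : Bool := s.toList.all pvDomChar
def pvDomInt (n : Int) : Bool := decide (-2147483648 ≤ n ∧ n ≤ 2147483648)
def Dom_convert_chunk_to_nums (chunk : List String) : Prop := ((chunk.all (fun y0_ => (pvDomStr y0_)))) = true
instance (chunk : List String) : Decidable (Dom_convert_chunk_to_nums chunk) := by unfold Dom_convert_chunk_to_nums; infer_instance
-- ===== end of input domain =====

-- B flattens the right-aligned rows into one character buffer and reads each column as a
-- strided slice s[w-1-j::w] of that buffer, instead of A's nested per-column character loops.

-- ===== PORT A =====
-- Literal transliteration of A. Python strings are handled on the List Char side (the PySem.Chars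
-- convention). Where Python raises (chunk[0] on [], sub_chunk[-(i+1)] out of range, int() on a
-- non-numeric string) the PySem primitive is none; the .getD/.headD defaults below are exercised
-- only outside Pre_convert_chunk_to_nums.
def convert_chunk_to_nums (chunk : List String) : List Int :=
  (PySem.List.pyRange 0 (PySem.Str.len (chunk.headD "")) 1).foldl   -- for i in range(width)
    (fun nums i =>
      nums ++ [(PySem.Int.ofChars?                                  -- nums.append(int(num_str))
        (chunk.foldl                                                -- for sub_chunk in chunk
          (fun s row => s ++ (((PySem.Str.pyGet? row ((i + 1) * (-1))).map (fun c => [c])).getD []))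
          ([] : List Char))).getD 0])                               -- num_str += sub_chunk[(i+1)*-1]
    []

-- ===== PORT B =====
-- Transliteration of B (Source B):
--   w = len(chunk[0]); s = ''.join(row[len(row) - w:] for row in chunk)
--   return [int(s[w - 1 - j::w]) for j in range(w)]
-- row[len(row)-w:] is PySem.List.slice with start len(row)-w; the strided slice s[w-1-j::w] is
-- PySem.List.slice? with step w (its .getD [] default and int()'s .getD 0 default are exercised
-- only outside Pre_convert_chunk_to_nums).
def convert_chunk_to_nums_alt (chunk : List String) : List Int :=
  let w : Int := PySem.Str.len (chunk.headD "")
  let s : List Char :=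
    (chunk.map (fun row =>
      PySem.List.slice row.toList (some (PySem.List.len row.toList - w)) none)).flatten
  (PySem.List.pyRange 0 w 1).map (fun j =>
    (PySem.Int.ofChars? ((PySem.List.slice? s (some (w - 1 - j)) none w).getD [])).getD 0)

-- ===== PRECONDITION & SPEC =====
-- Column j of chunk: the characters its rows carry at offset j from the right.
def pvColumn (chunk : List String) (j : Nat) : List Char :=
  chunk.map (fun s => s.toList.reverse.getD j ' ')

-- Pre_ = exactly the inputs on which Python A returns: chunk nonempty (else chunk[0] raises
-- IndexError), every row at least as long as the first (else sub_chunk[-(i+1)] raises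
-- IndexError), and every column an int()-parsable string (else int(num_str) raises ValueError).
def Pre_convert_chunk_to_nums (chunk : List String) : Prop :=
  chunk ≠ [] ∧
  (∀ s ∈ chunk, (chunk.headD "").toList.length ≤ s.toList.length) ∧
  (∀ j < (chunk.headD "").toList.length, (PySem.Int.ofChars? (pvColumn chunk j)).isSome = true)
instance (chunk : List String) : Decidable (Pre_convert_chunk_to_nums chunk) := by
  unfold Pre_convert_chunk_to_nums; infer_instance

def pvWitness_convert_chunk_to_nums : List String := ["12", "34"]

def Spec_convert_chunk_to_nums (chunk : List String) (out : List Int) : Prop := out = convert_chunk_to_nums_alt chunk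
instance (chunk : List String) (out : List Int) : Decidable (Spec_convert_chunk_to_nums chunk out) := by unfold Spec_convert_chunk_to_nums; infer_instance

-- ===== CLAIM (what is proved, stated in full; the proofs are below) =====
def Claim_equal_convert_chunk_to_nums : Prop := ∀ (chunk : List String), Dom_convert_chunk_to_nums chunk → Pre_convert_chunk_to_nums chunk → Spec_convert_chunk_to_nums chunk (convert_chunk_to_nums chunk)

-- ===== LEMMAS AND PROOFS =====

-- Python's negative index: l[-(j+1)] is the j-th element of l.reverse (for j < len l).
theorem pvPyGetNeg (l : List Char) (j : Nat) (h : j < l.length) :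
    PySem.List.pyGet? l (-(↑j + 1)) = some (l.reverse.getD j ' ') := by
  simp only [PySem.List.pyGet?, PySem.List.pyIdx?]
  split_ifs with h1 h2 h3 <;> try omega
  simp only [Option.bind_some]
  rw [List.getElem?_eq_getElem (by omega)]
  have hrev : j < l.reverse.length := by simpa using h
  rw [List.getD_eq_getElem?_getD, List.getElem?_eq_getElem hrev]
  simp only [Option.getD_some, Option.some.injEq]
  rw [List.getElem_reverse]
  congr 1
  omega

-- A computes, column by column, int() of pvColumn.
theorem pvAeq (chunk : List String)
    (hw : ∀ s ∈ chunk, (chunk.headD "").toList.length ≤ s.toList.length) :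
    convert_chunk_to_nums chunk =
      (List.range (chunk.headD "").toList.length).map
        (fun j => (PySem.Int.ofChars? (pvColumn chunk j)).getD 0) := by
  unfold convert_chunk_to_nums
  rw [PySem.Str.len_eq, PySem.List.pyRange_zero_natCast]
  rw [PySem.List.foldl_append_singleton_eq_map]
  simp only [List.nil_append, List.map_map]
  apply List.map_congr_left
  intro j hj
  have hjw : j < (chunk.headD "").toList.length := List.mem_range.mp hj
  simp only [Function.comp]
  congr 1
  rw [PySem.List.foldl_append_eq_flatMap, List.nil_append]
  unfold pvColumn
  rw [List.flatMap_def]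
  rw [List.map_congr_left (g := fun row => [row.toList.reverse.getD j ' ']) ?_]
  · rw [← List.flatMap_def, ← List.map_eq_flatMap]
  · intro row hrow
    have hlen : j < row.toList.length := lt_of_lt_of_le hjw (hw row hrow)
    have harith : ((j:Int) + 1) * (-1) = -((j:Int) + 1) := by ring
    rw [harith]
    have hg := pvPyGetNeg row.toList j hlen
    simp only [PySem.Str.pyGet?, PySem.Chars.pyGet?] at *
    rw [hg]
    rfl

-- Reading the flat buffer at positions p, p+w, p+2w, … (p < w, every row of length w)
-- picks, row by row, the character at offset p of each row.
theorem pvStrideFilterMap (w p : Nat) (hp : p < w) (rows : List (List Char))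
    (hlen : ∀ r ∈ rows, r.length = w) :
    List.filterMap (fun k => rows.flatten[p + w * k]?) (List.range rows.length) =
      rows.map (fun r => r.getD p ' ') := by
  induction rows with
  | nil => simp
  | cons r t ih =>
    have hr : r.length = w := hlen r (List.mem_cons_self ..)
    have ht : ∀ x ∈ t, x.length = w := fun x hx => hlen x (List.mem_cons_of_mem _ hx)
    simp only [List.length_cons, List.range_succ_eq_map, List.filterMap_cons, List.flatten_cons]
    have h0 : (r ++ t.flatten)[p + w * 0]? = some (r.getD p ' ') := by
      rw [Nat.mul_zero, Nat.add_zero, List.getElem?_append_left (by omega)]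
      rw [List.getElem?_eq_getElem (by omega), List.getD_eq_getElem?_getD,
        List.getElem?_eq_getElem (by omega)]
      simp
    rw [h0]
    simp only [List.filterMap_map, List.map_cons]
    congr 1
    rw [← ih ht]
    apply List.filterMap_congr
    intro k hk
    simp only [Function.comp]
    have : p + w * (k + 1) = r.length + (p + w * k) := by
      rw [hr]; ring
    rw [this, List.getElem?_append_right (by omega)]
    congr 1
    omega

-- The strided slice s[p::w] of the flat buffer of n rows of length w is column p (n rows, p < w).
theorem pvSliceStride (w p : Nat) (hp : p < w) (rows : List (List Char))
    (hlen : ∀ r ∈ rows, r.length = w) :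
    PySem.List.slice? rows.flatten (some (p : Int)) none (w : Int) =
      some (rows.map (fun r => r.getD p ' ')) := by
  have hflatlen : rows.flatten.length = rows.length * w := by
    rw [List.length_flatten]
    induction rows with
    | nil => simp
    | cons r t ih =>
      simp only [List.map_cons, List.sum_cons, List.length_cons]
      rw [ih (fun x hx => hlen x (List.mem_cons_of_mem _ hx)),
        hlen r (List.mem_cons_self ..)]
      ring
  have hw0 : (w : Int) ≠ 0 := by omega
  simp only [PySem.List.slice?, PySem.List.sliceIndices]
  rw [if_neg hw0]
  have hstep : ¬ ((w : Int) < 0) := by omega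
  simp only [hstep, if_false]
  -- start = min p (flatten.length), stop = flatten.length
  rw [if_neg (by omega : ¬ ((p:Int) < 0))]
  cases rows with
  | nil =>
    simp
  | cons r0 t0 =>
    have hlenpos : 1 ≤ (r0 :: t0).length := by simp
    have hmin : min (p : Int) ((r0 :: t0).flatten.length : Int) = (p : Int) := by
      rw [hflatlen]
      have : p < (r0 :: t0).length * w := lt_of_lt_of_le hp (Nat.le_mul_of_pos_left w (by simp))
      exact min_eq_left (by exact_mod_cast this.le)
    rw [hmin]
    have hpos : (0 : Int) < (w : Int) := by omega
    rw [if_pos hpos]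
    set n := (r0 :: t0).length with hn
    have hcount : (((r0 :: t0).flatten.length : Int) - (p : Int) + (w : Int) - 1) / (w : Int) = (n : Int) := by
      rw [hflatlen]
      have hq : ((n : Int) * w - p + w - 1) = ((w : Int) - 1 - p) + (w : Int) * (n : Int) := by ring
      push_cast
      push_cast at hq
      rw [hq, Int.add_mul_ediv_left _ _ hw0]
      rw [Int.ediv_eq_zero_of_lt (by omega) (by omega)]
      ring
    rw [if_pos (by
      rw [hflatlen]
      have : p < n * w := lt_of_lt_of_le hp (Nat.le_mul_of_pos_left w (by simp [hn]))
      exact_mod_cast this)]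
    rw [hcount]
    simp only [Int.toNat_natCast, Option.some.injEq]
    rw [← pvStrideFilterMap w p hp (r0 :: t0) hlen]
    apply List.filterMap_congr
    intro k hk
    congr 1

-- B computes the same column-by-column list.
theorem pvBeq (chunk : List String)
    (hw : ∀ s ∈ chunk, (chunk.headD "").toList.length ≤ s.toList.length) :
    convert_chunk_to_nums_alt chunk =
      (List.range (chunk.headD "").toList.length).map
        (fun j => (PySem.Int.ofChars? (pvColumn chunk j)).getD 0) := by
  unfold convert_chunk_to_nums_alt
  set wN := (chunk.headD "").toList.length with hwN
  -- the truncated rows all have length wN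
  have htrunc : ∀ row ∈ chunk,
      PySem.List.slice row.toList (some (PySem.List.len row.toList - (wN : Int))) none =
        row.toList.drop (row.toList.length - wN) := by
    intro row hrow
    have hle := hw row hrow
    rw [PySem.List.len_eq, PySem.List.slice_from]
    · congr 1
      omega
    · omega
  simp only [PySem.Str.len_eq, ← hwN]
  rw [PySem.List.pyRange_zero_natCast]
  simp only [List.map_map]
  apply List.map_congr_left
  intro j hj
  have hjw : j < wN := List.mem_range.mp hj
  simp only [Function.comp]
  rw [List.map_congr_left htrunc]
  have harith : ((wN : Int) - 1 - (j : Int)) = ((wN - 1 - j : Nat) : Int) := by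
    omega
  rw [harith]
  rw [pvSliceStride wN (wN - 1 - j) (by omega)
      (chunk.map (fun row => row.toList.drop (row.toList.length - wN)))
      (by
        intro r hr
        obtain ⟨row, hrow, rfl⟩ := List.mem_map.mp hr
        have := hw row hrow
        simp only [List.length_drop]
        omega)]
  simp only [Option.getD_some]
  congr 1
  unfold pvColumn
  simp only [List.map_map]
  congr 1
  apply List.map_congr_left
  intro row hrow
  have hlen := hw row hrow
  simp only [Function.comp]
  -- (drop (len - wN) row).getD (wN - 1 - j) = row.reverse.getD j
  have hdl : (row.toList.drop (row.toList.length - wN)).length = wN := by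
    rw [List.length_drop]; omega
  rw [List.getD_eq_getElem?_getD, List.getElem?_eq_getElem (by omega),
    List.getD_eq_getElem?_getD, List.getElem?_eq_getElem (by simpa using lt_of_lt_of_le hjw hlen)]
  simp only [Option.getD_some]
  rw [List.getElem_drop, List.getElem_reverse]
  congr 1
  omega

-- ===== VERDICT (by name: the statement is the Claim_ definition above) =====
theorem convert_chunk_to_nums_spec : Claim_equal_convert_chunk_to_nums := by
  intro chunk _ hpre
  obtain ⟨_, hw, _⟩ := hpre
  unfold Spec_convert_chunk_to_nums
  rw [pvAeq chunk hw, pvBeq chunk hw]
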